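-- pv_equiv track=rewrite | github.com/tuanphung2005/CTDLGT-Slide-PTIT | code/code-ptit/QUAYLUI-NHANHCAN/DSA02005.py | solve
-- ===== SOURCE A (Python) =====
-- def solve(s):
--
--     chars = sorted(s)
--     n = len(chars)
--     used = [False]*n
--     cur = []
--     res = []
--
--     def backtrack():
--         if len(cur) == n:
--             res.append(''.join(cur))
--             return
--         for i in range(n):
--             if used[i]:
--                 continue
--             used[i] = True
--             cur.append(chars[i])
--             backtrack()
--             cur.pop()
--             used[i] = False
--
--     backtrack()
--     return res
-- ===== SOURCE B (Python) =====
-- def solve(s):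
--     def perms(prefix, rest):
--         if not rest:
--             return [''.join(prefix)]
--         out = []
--         for i in range(len(rest)):
--             out.extend(perms(prefix + [rest[i]], rest[:i] + rest[i+1:]))
--         return out
--     return perms([], sorted(s))
-- ===== Notes on version B (the rewrite author's own statement) =====
-- stated objective: alternative
-- what changed: Replaces the shared mutable used[]-mask/cur-accumulator backtracking with a pure result-returning recursion perms(prefix, rest) that concatenates the permutation lists of the shrunken list rest[:i]+rest[i+1:] for each i.
import Mathlib
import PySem

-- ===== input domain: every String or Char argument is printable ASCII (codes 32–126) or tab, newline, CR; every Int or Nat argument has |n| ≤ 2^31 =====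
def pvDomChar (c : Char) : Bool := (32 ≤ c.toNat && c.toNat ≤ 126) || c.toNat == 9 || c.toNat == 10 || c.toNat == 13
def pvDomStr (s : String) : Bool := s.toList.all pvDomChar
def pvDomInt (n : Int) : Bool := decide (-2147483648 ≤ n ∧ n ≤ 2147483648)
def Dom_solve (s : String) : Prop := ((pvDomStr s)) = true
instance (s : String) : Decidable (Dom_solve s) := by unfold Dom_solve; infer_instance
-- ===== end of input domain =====

-- B replaces A's shared used[]-mask/cur backtracking by a pure result-returning
-- recursion over a shrinking list (alternative decomposition, same output).

-- ===== PORT A =====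
-- A's backtrack() : recursion on an explicit used[] mask and cur accumulator.
-- fuel is a totality guard only (depth of the recursion is bounded by chars.length).
def btA (chars : List Char) (fuel : Nat) (used : List Bool) (cur : List Char)
    (res : List String) : List String :=
  match fuel with
  | 0 => res
  | f + 1 =>
    if cur.length = chars.length then res ++ [String.ofList cur]
    else
      (List.range chars.length).foldl
        (fun r i =>
          if used.getD i false then r
          else btA chars f (used.set i true) (cur ++ [chars.getD i ' ']) r)
        res

def solve (s : String) : List String :=
  let chars := PySem.List.sorted s.toList (fun c => c) false
  btA chars (chars.length + 1) (List.replicate chars.length false) [] []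

-- ===== PORT B =====
-- B's perms(prefix, rest): [''.join(prefix)] when rest is empty, else the
-- concatenation over i of perms(prefix + [rest[i]], rest[:i] + rest[i+1:]).
-- fuel is a totality guard only.
def permsB (fuel : Nat) (pre : List Char) (rest : List Char) : List String :=
  match fuel with
  | 0 => []
  | f + 1 =>
    if rest.isEmpty then [String.ofList pre]
    else
      (List.range rest.length).foldl
        (fun out i =>
          out ++ permsB f (pre ++ [rest.getD i ' '])
              (rest.take i ++ rest.drop (i + 1)))
        []

def solve_alt (s : String) : List String :=
  let chars := PySem.List.sorted s.toList (fun c => c) false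
  permsB (chars.length + 1) [] chars

-- ===== PRECONDITION & SPEC =====
def Spec_solve (s : String) (out : List String) : Prop := out = solve_alt s
instance (s : String) (out : List String) : Decidable (Spec_solve s out) := by unfold Spec_solve; infer_instance

-- ===== CLAIM (what is proved, stated in full; the proofs are below) =====
def Claim_equal_solve : Prop := ∀ (s : String), Dom_solve s → Spec_solve s (solve s)

-- ===== LEMMAS AND PROOFS =====

-- the characters of chars that the mask `used` has not consumed, in order
def avail : List Char → List Bool → List Char
  | [], _ => []
  | _ :: _, [] => []
  | c :: cs, u :: us => if u then avail cs us else c :: avail cs us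

theorem avail_replicate (cs : List Char) :
    avail cs (List.replicate cs.length false) = cs := by
  induction cs with
  | nil => rfl
  | cons c cs ih => simp [List.replicate_succ, avail, ih]

theorem length_avail_set (cs : List Char) (us : List Bool) (i : Nat)
    (hlen : us.length = cs.length) (hi : i < us.length)
    (hu : us.getD i false = false) :
    (avail cs (us.set i true)).length + 1 = (avail cs us).length := by
  induction cs generalizing us i with
  | nil =>
    have hus : us = [] := List.eq_nil_of_length_eq_zero (by simpa using hlen)
    subst hus; simp at hi
  | cons c cs ih =>
    cases us with
    | nil => simp at hi
    | cons u us =>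
      cases i with
      | zero =>
        simp at hu; subst hu
        simp [avail]
      | succ i =>
        simp at hlen hi hu
        simp [avail]
        split <;> simpa using ih us i hlen hi hu

theorem flatMap_ite_skip {α β : Type} (l : List α) (p : α → Bool) (g : α → List β) :
    (l.flatMap fun x => if p x then [] else g x)
      = (l.filter fun x => !p x).flatMap g := by
  induction l with
  | nil => rfl
  | cons x l ih =>
    by_cases h : p x = true <;> simp [List.flatMap_cons, h, ih]

theorem foldl_if_skip_append {α β : Type} (l : List α) (p : α → Bool)
    (g : α → List β) (acc : List β) :
    l.foldl (fun r x => if p x then r else r ++ g x) acc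
      = acc ++ (l.filter fun x => !p x).flatMap g := by
  have h1 : l.foldl (fun r x => if p x then r else r ++ g x) acc
      = l.foldl (fun r x => r ++ if p x then [] else g x) acc := by
    apply PySem.List.foldl_congr_mem
    intro r x _; by_cases h : p x = true <;> simp [h]
  rw [h1, PySem.List.foldl_append_eq_flatMap, flatMap_ite_skip]

-- the bijection between A's unused indices of `us` and B's positions of `avail cs us`
theorem corr (cs : List Char) (us : List Bool) (hlen : us.length = cs.length)
    (W : Char → List Char → List String) :
    ((List.range cs.length).filter fun i => !(us.getD i false)).flatMap
        (fun i => W (cs.getD i ' ') (avail cs (us.set i true)))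
      = (List.range (avail cs us).length).flatMap
        (fun j => W ((avail cs us).getD j ' ')
          ((avail cs us).take j ++ (avail cs us).drop (j + 1))) := by
  induction cs generalizing us W with
  | nil =>
    cases us with
    | nil => rfl
    | cons u us => simp at hlen
  | cons c cs ih =>
    cases us with
    | nil => simp at hlen
    | cons u us =>
      simp only [List.length_cons] at hlen
      have hlen' : us.length = cs.length := by omega
      cases u with
      | true =>
        have h1 := ih us hlen' W
        simp only [List.length_cons, List.range_succ_eq_map, List.filter_cons,
          List.getD_cons_zero, List.getD_cons_succ, Bool.not_true, if_false,
          Bool.false_eq_true, List.filter_map, Function.comp_def,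
          List.flatMap_map, List.set_cons_succ, avail, if_true] at h1 ⊢
        exact h1
      | false =>
        have hA : avail (c :: cs) (false :: us) = c :: avail cs us := by
          simp [avail]
        have h1 := ih us hlen' (fun ch l => W ch (c :: l))
        simp only at h1
        simp only [List.length_cons, List.range_succ_eq_map, List.filter_cons,
          List.getD_cons_zero, List.getD_cons_succ, Bool.not_false, if_true,
          List.filter_map, Function.comp_def, List.flatMap_cons, List.flatMap_map,
          List.set_cons_succ, List.set_cons_zero, avail, if_false,
          Bool.false_eq_true, List.take_succ_cons, List.drop_succ_cons,
          List.take_zero, List.drop_zero, List.nil_append, List.cons_append,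
          Nat.succ_eq_add_one] at h1 ⊢
        rw [h1]

theorem main_lemma (cs : List Char) (f : Nat) (us : List Bool) (cur : List Char)
    (res : List String) (hlen : us.length = cs.length)
    (hinv : cur.length + (avail cs us).length = cs.length)
    (hf : (avail cs us).length < f) :
    btA cs f us cur res = res ++ permsB f cur (avail cs us) := by
  induction f generalizing us cur res with
  | zero => omega
  | succ f ih =>
    by_cases hA : avail cs us = []
    · have hc : cur.length = cs.length := by rw [hA] at hinv; simpa using hinv
      simp [btA, permsB, hA, hc]
    · have hm : 0 < (avail cs us).length := List.length_pos_iff.mpr hA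
      have hc : ¬ cur.length = cs.length := by omega
      have hne : (avail cs us).isEmpty = false := by
        simpa [List.isEmpty_iff] using hA
      simp only [btA, permsB, hc, if_false, hne, Bool.false_eq_true]
      have hstep : (List.range cs.length).foldl
          (fun r i =>
            if us.getD i false then r
            else btA cs f (us.set i true) (cur ++ [cs.getD i ' ']) r) res
          = (List.range cs.length).foldl
          (fun r i =>
            if us.getD i false then r
            else r ++ permsB f (cur ++ [cs.getD i ' '])
              (avail cs (us.set i true))) res := by
        apply PySem.List.foldl_congr_mem
        intro r i hi
        have hi' : i < cs.length := List.mem_range.mp hi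
        by_cases hu : us.getD i false = true
        · rw [if_pos hu, if_pos hu]
        · have hu' : us.getD i false = false := by
            cases h : us.getD i false with
            | true => exact absurd h hu
            | false => rfl
          have hset : (avail cs (us.set i true)).length + 1 = (avail cs us).length :=
            length_avail_set cs us i hlen (by omega) hu'
          have := ih (us.set i true) (cur ++ [cs.getD i ' ']) r
            (by simpa using hlen) (by simp; omega) (by omega)
          simp only [hu', if_false, Bool.false_eq_true]
          rw [this]
      rw [hstep, foldl_if_skip_append, PySem.List.foldl_append_eq_flatMap,
        List.nil_append]
      have hcorr := corr cs us hlen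
        (fun ch l => permsB f (cur ++ [ch]) l)
      simp only at hcorr
      rw [hcorr]

-- ===== VERDICT (by name: the statement is the Claim_ definition above) =====
theorem solve_spec : Claim_equal_solve := by
  intro s _
  unfold Spec_solve solve solve_alt
  simp only []
  set chars := PySem.List.sorted s.toList (fun c => c) false with hchars
  have h := main_lemma chars (chars.length + 1) (List.replicate chars.length false)
    [] [] (by simp) (by simp [avail_replicate]) (by simp [avail_replicate])
  rw [h, avail_replicate]
  simp
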